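-- pv_equiv track=rewrite | github.com/ZerghamAhmed/TheoryCoder | predicates.py | pushable_word_up
-- ===== SOURCE A (Python) =====
-- def pushable_word_up(state, word):
--     """
--     Check if the word can be pushed upwards.
--
--     Args:
--     state (dict): The current game state.
--     word (str): The word entity to check.
--
--     Returns:
--     bool: True if the word is pushable upwards, False otherwise.
--     """
--     for (x, y) in state.get(word, []):
--         obj_pos = [x, y + 1]      # Position where baba_obj needs to be to push up
--         target_pos = [x, y - 1]   # Position where the word will be pushed to
--
--         if target_pos not in state.get('empty', []):
--             return False
--         if obj_pos not in state.get('empty', []):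
--             return False
--     return True
-- ===== SOURCE B (Python) =====
-- def pushable_word_up(state, word):
--     """
--     Check if the word can be pushed upwards.
--
--     Sort-then-merge: sort the list of required positions (above and below
--     each occurrence of the word) and the list of empty cells, then verify
--     the subset property with a single linear two-pointer merge scan.
--     """
--     required = sorted(p for (x, y) in state.get(word, []) for p in ([x, y - 1], [x, y + 1]))
--     empties = sorted(state.get('empty', []))
--     i = 0
--     for r in required:
--         while i < len(empties) and empties[i] < r:
--             i += 1
--         if i == len(empties) or empties[i] != r:
--             return False
--     return True
-- ===== Notes on version B (the rewrite author's own statement) =====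
-- stated objective: alternative
-- what changed: Replaces A's per-cell short-circuiting loop with two list scans of 'empty' per cell by a sort-then-merge subset check: sort the required positions and the empty cells once, then verify containment in a single two-pointer merge scan.
-- outside the precondition, e.g. on pushable_word_up({'y': [[0, 0], [2, 3, 2]]}, 'y'): A returns False, B raises ValueError
import Mathlib
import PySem

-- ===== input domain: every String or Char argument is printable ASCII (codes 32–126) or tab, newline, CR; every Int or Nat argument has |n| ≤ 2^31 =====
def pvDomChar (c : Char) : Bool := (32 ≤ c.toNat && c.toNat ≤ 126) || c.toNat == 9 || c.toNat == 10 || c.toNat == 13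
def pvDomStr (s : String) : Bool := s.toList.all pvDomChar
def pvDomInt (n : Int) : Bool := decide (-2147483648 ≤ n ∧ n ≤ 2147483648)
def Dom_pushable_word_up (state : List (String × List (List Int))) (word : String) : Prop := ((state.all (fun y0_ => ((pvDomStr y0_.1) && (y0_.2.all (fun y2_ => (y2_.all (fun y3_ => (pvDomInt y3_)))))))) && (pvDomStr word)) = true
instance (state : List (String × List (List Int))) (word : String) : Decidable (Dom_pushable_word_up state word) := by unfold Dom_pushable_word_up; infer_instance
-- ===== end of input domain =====

-- B replaces A's per-cell membership scans by sort-then-merge: sort the required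
-- positions and the empty cells and check the subset property in one two-pointer scan
-- (objective: alternative).

-- ===== PORT A =====
-- the 'for (x, y) in state.get(word, [])' loop; a cell that is not a pair is a
-- Python ValueError (unpacking), excluded by Pre_; 'false' there is arbitrary
def pwuLoopA (empties : List (List Int)) : List (List Int) → Bool
  | [] => true
  | c :: rest =>
    match c with
    | [x, y] =>
      if ¬ ([x, y - 1] ∈ empties) then false       -- target_pos not in state.get('empty', [])
      else if ¬ ([x, y + 1] ∈ empties) then false  -- obj_pos not in state.get('empty', [])
      else pwuLoopA empties rest
    | _ => false

def pushable_word_up (state : List (String × List (List Int))) (word : String) : Bool :=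
  pwuLoopA (PySem.Dict.getD (PySem.Dict.mk state) "empty" []) (PySem.Dict.getD (PySem.Dict.mk state) word [])

-- ===== PORT B =====
-- one step of B's generator expression '[x, y - 1], [x, y + 1] for (x, y) in …';
-- a cell that is not a pair is a Python ValueError (unpacking), excluded by Pre_
def pwuNeighbors (c : List Int) : List (List Int) :=
  match c with
  | [x, y] => [[x, y - 1], [x, y + 1]]
  | _ => []

-- the inner 'while i < len(empties) and empties[i] < r: i += 1'
def pwuAdv (emp : List (List Int)) (r : List Int) (i : Nat) : Nat :=
  if h : i < emp.length then
    if emp[i] < r then pwuAdv emp r (i + 1) else i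
  else i
termination_by emp.length - i

-- the 'for r in required' loop carrying the pointer i
def pwuMerge (emp : List (List Int)) : List (List Int) → Nat → Bool
  | [], _ => true
  | r :: rest, i =>
    let j := pwuAdv emp r i
    if hj : j < emp.length then
      if emp[j] = r then pwuMerge emp rest j else false   -- 'empties[i] != r: return False'
    else false                                            -- 'i == len(empties): return False'

def pushable_word_up_alt (state : List (String × List (List Int))) (word : String) : Bool :=
  let required := PySem.List.sorted
    ((PySem.Dict.getD (PySem.Dict.mk state) word []).flatMap pwuNeighbors) (fun p => p) false
  let empties := PySem.List.sorted (PySem.Dict.getD (PySem.Dict.mk state) "empty" []) (fun p => p) false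
  pwuMerge empties required 0

-- ===== PRECONDITION & SPEC =====
-- Pre_ excludes occurrence lists for `word` containing a cell that is not a 2-element
-- pair: tuple unpacking raises ValueError in both programs (A may return False first if
-- an earlier cell already fails, B consumes the whole generator before merging and raises).
def Pre_pushable_word_up (state : List (String × List (List Int))) (word : String) : Prop :=
  ∀ c ∈ PySem.Dict.getD (PySem.Dict.mk state) word [], c.length = 2
instance (state : List (String × List (List Int))) (word : String) : Decidable (Pre_pushable_word_up state word) := by unfold Pre_pushable_word_up; infer_instance

def pvWitness_pushable_word_up : (List (String × List (List Int))) × String :=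
  ([("w", [[1, 2]]), ("empty", [[1, 1], [1, 3]])], "w")

def Spec_pushable_word_up (state : List (String × List (List Int))) (word : String) (out : Bool) : Prop := out = pushable_word_up_alt state word
instance (state : List (String × List (List Int))) (word : String) (out : Bool) : Decidable (Spec_pushable_word_up state word out) := by unfold Spec_pushable_word_up; infer_instance

-- ===== CLAIM =====
def Claim_equal_pushable_word_up : Prop := ∀ (state : List (String × List (List Int))) (word : String), Dom_pushable_word_up state word → Pre_pushable_word_up state word → Spec_pushable_word_up state word (pushable_word_up state word)

-- ===== LEMMAS AND PROOFS =====

-- A's loop, characterised: under Pre_, it decides that every required position is empty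
lemma pwuLoopA_eq_decide (E : List (List Int)) :
    ∀ (cells : List (List Int)), (∀ c ∈ cells, c.length = 2) →
      pwuLoopA E cells = decide (∀ r ∈ cells.flatMap pwuNeighbors, r ∈ E) := by
  intro cells
  induction cells with
  | nil => intro _; simp [pwuLoopA]
  | cons c rest ih =>
    intro hlen
    have hc : c.length = 2 := hlen c (by simp)
    obtain ⟨x, y, rfl⟩ : ∃ x y, c = [x, y] := by
      match c, hc with
      | [x, y], _ => exact ⟨x, y, rfl⟩
    have ih' := ih (fun c hc => hlen c (by simp [hc]))
    simp only [pwuLoopA, ih']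
    by_cases h1 : [x, y - 1] ∈ E <;> by_cases h2 : [x, y + 1] ∈ E <;>
      simp [h1, h2, pwuNeighbors]

-- the while loop: everything strictly before the returned index is < r,
-- and the returned index (if in range) is not < r
lemma pwuAdv_spec (emp : List (List Int)) (r : List Int) :
    ∀ i, i ≤ emp.length →
      i ≤ pwuAdv emp r i ∧ pwuAdv emp r i ≤ emp.length ∧
      (∀ k (hk : k < emp.length), i ≤ k → k < pwuAdv emp r i → emp[k] < r) ∧
      (∀ (hj : pwuAdv emp r i < emp.length), ¬ emp[pwuAdv emp r i] < r) := by
  intro i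
  induction i using pwuAdv.induct emp r with
  | case1 i h hlt ih =>
    intro _
    rw [pwuAdv, dif_pos h, if_pos hlt]
    obtain ⟨ih1, ih2, ih3, ih4⟩ := ih (by omega)
    refine ⟨by omega, ih2, ?_, ih4⟩
    intro k hk hik hkj
    by_cases hki : k = i
    · subst hki; exact hlt
    · exact ih3 k hk (by omega) hkj
  | case2 i h hlt =>
    intro _
    rw [pwuAdv, dif_pos h, if_neg hlt]
    exact ⟨le_refl _, by omega, fun k hk h1 h2 => absurd h2 (by omega), fun _ => hlt⟩
  | case3 i h =>
    intro hi
    rw [pwuAdv, dif_neg h]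
    exact ⟨le_refl _, hi, fun k hk h1 h2 => absurd hk (by omega), fun hj => absurd hj h⟩

-- the merge loop on sorted inputs decides the subset property
lemma pwuMerge_eq_decide (emp : List (List Int)) (hemp : emp.Pairwise (· ≤ ·)) :
    ∀ (req : List (List Int)), req.Pairwise (· ≤ ·) →
      ∀ i, i ≤ emp.length →
        (∀ k (hk : k < emp.length), k < i → ∀ r' ∈ req, emp[k] < r') →
        pwuMerge emp req i = decide (∀ r ∈ req, r ∈ emp) := by
  intro req
  induction req with
  | nil => intro _ i _ _; simp [pwuMerge]
  | cons r rest ih =>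
    intro hreq i hi hinv
    have hrle : ∀ r' ∈ rest, r ≤ r' := (List.pairwise_cons.mp hreq).1
    have hrest := (List.pairwise_cons.mp hreq).2
    obtain ⟨hij, hjlen, hbelow, hat⟩ := pwuAdv_spec emp r i hi
    set j := pwuAdv emp r i with hjdef
    have hpref : ∀ k (hk : k < emp.length), k < j → emp[k] < r := by
      intro k hk hkj
      by_cases hki : k < i
      · exact hinv k hk hki r (by simp)
      · exact hbelow k hk (by omega) hkj
    have hmono : ∀ k (hk : k < emp.length) (hj : j < emp.length), j ≤ k → emp[j] ≤ emp[k] := by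
      intro k hk hj hjk
      rcases Nat.eq_or_lt_of_le hjk with h | h
      · subst h; exact le_refl _
      · exact (List.pairwise_iff_getElem.mp hemp) j k hj hk h
    simp only [pwuMerge]
    by_cases hj : j < emp.length
    · rw [dif_pos hj]
      by_cases heq : emp[j] = r
      · rw [if_pos heq]
        have hrmem : r ∈ emp := heq ▸ List.getElem_mem hj
        have hinv' : ∀ k (hk : k < emp.length), k < j → ∀ r' ∈ rest, emp[k] < r' := by
          intro k hk hkj r' hr'
          exact lt_of_lt_of_le (hpref k hk hkj) (hrle r' hr')
        rw [ih hrest j hjlen hinv']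
        simp [hrmem]
      · rw [if_neg heq]
        have hnot : r ∉ emp := by
          intro hmem
          obtain ⟨k, hk, hkr⟩ := List.getElem_of_mem hmem
          rcases lt_or_ge k j with h | h
          · exact absurd hkr (ne_of_lt (hpref k hk h))
          · have h1 : emp[j] ≤ r := hkr ▸ hmono k hk hj h
            have h2 : r ≤ emp[j] := le_of_not_gt (hat hj)
            exact heq (le_antisymm h1 h2)
        simp [hnot]
    · rw [dif_neg hj]
      have hnot : r ∉ emp := by
        intro hmem
        obtain ⟨k, hk, hkr⟩ := List.getElem_of_mem hmem
        exact absurd hkr (ne_of_lt (hpref k hk (by omega)))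
      simp [hnot]

-- ===== VERDICT =====
theorem pushable_word_up_spec : Claim_equal_pushable_word_up := by
  intro state word _ hpre
  unfold Spec_pushable_word_up pushable_word_up pushable_word_up_alt
  set cells := PySem.Dict.getD (PySem.Dict.mk state) word [] with hcells
  set E := PySem.Dict.getD (PySem.Dict.mk state) "empty" [] with hE
  have hinst : (LinearOrder.toDecidableLT : DecidableLT (List Int)) = (fun a b => a.decidableLT b) := by
    funext a b; exact Subsingleton.elim _ _
  have hempP : (PySem.List.sorted E (fun p => p) false).Pairwise
      (fun a b : List Int => a ≤ b) := by
    have h := PySem.List.sorted_pairwise (κ := List Int) E (fun p => p)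
    rw [hinst] at h; exact h
  have hreqP : (PySem.List.sorted (cells.flatMap pwuNeighbors) (fun p => p) false).Pairwise
      (fun a b : List Int => a ≤ b) := by
    have h := PySem.List.sorted_pairwise (κ := List Int) (cells.flatMap pwuNeighbors) (fun p => p)
    rw [hinst] at h; exact h
  rw [pwuMerge_eq_decide _ hempP _ hreqP 0 (by omega) (fun k hk hki => absurd hki (by omega))]
  rw [pwuLoopA_eq_decide E cells hpre]
  congr 1
  rw [eq_iff_iff]
  constructor
  · intro h r hr
    rw [PySem.List.mem_sorted]
    exact h r ((PySem.List.mem_sorted _ _ _ _).mp hr)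
  · intro h r hr
    have := h r ((PySem.List.mem_sorted _ _ _ _).mpr hr)
    rwa [PySem.List.mem_sorted] at this
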